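-- pv_equiv track=rewrite | github.com/SaiKumarSeela/Call-Summary | main2.py | extract_speaker_texts
-- ===== SOURCE A (Python) =====
-- def extract_speaker_texts(conversation):
--     speaker_texts = {}
--     for entry in conversation:
--         speaker, text = entry.split(': ', 1)
--         if speaker not in speaker_texts:
--             speaker_texts[speaker] = []
--         speaker_texts[speaker].append(text)
--     return {speaker: ' '.join(texts) for speaker, texts in speaker_texts.items()}
-- ===== SOURCE B (Python) =====
-- def extract_speaker_texts(conversation):
--     result = {}
--     for entry in conversation:
--         speaker, text = entry.split(': ', 1)
--         if speaker in result:
--             result[speaker] = result[speaker] + ' ' + text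
--         else:
--             result[speaker] = text
--     return result
-- ===== Notes on version B (the rewrite author's own statement) =====
-- stated objective: simpler
-- what changed: A groups texts into per-speaker lists and then joins each list in a second dict-comprehension pass; B keeps the already-joined string per speaker in a single pass and returns the dict directly.
import Mathlib
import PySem

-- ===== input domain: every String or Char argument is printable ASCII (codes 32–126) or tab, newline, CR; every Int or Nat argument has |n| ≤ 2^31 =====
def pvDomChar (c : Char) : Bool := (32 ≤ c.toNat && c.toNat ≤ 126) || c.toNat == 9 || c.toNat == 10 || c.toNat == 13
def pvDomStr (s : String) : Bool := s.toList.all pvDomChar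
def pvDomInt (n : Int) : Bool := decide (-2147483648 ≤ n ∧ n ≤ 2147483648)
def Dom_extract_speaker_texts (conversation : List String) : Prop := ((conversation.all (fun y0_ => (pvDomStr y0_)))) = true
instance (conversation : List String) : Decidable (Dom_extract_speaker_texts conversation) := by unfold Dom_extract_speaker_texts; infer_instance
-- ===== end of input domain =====

-- B replaces A's two-phase "collect lists per speaker, then join in a second pass" by a single
-- pass that keeps the already-joined string per speaker (objective: simpler — no second pass).

-- ===== PORT A =====
-- one loop iteration of A: split the entry, ensure the speaker's list exists, append the text
def pvStepA (d : PySem.Dict String (List String)) (entry : String) : PySem.Dict String (List String) :=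
  match PySem.Str.splitMax? entry ": " 1 with
  | some [speaker, text] =>
      let d1 := if d.contains speaker then d else d.insert speaker []
      d1.modify speaker [] (fun ts => ts ++ [text])
  | _ => d   -- Python raises ValueError here (unpack of ≠ 2 parts); excluded by Pre_

def extract_speaker_texts (conversation : List String) : List (String × String) :=
  ((conversation.foldl pvStepA PySem.Dict.empty).items).map
    (fun p => (p.1, PySem.Str.join " " p.2))

-- ===== PORT B =====
-- one loop iteration of B: split the entry, extend (or start) the speaker's joined string
def pvStepB (d : PySem.Dict String String) (entry : String) : PySem.Dict String String :=
  match PySem.Str.splitMax? entry ": " 1 with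
  | some [speaker, text] =>
      if d.contains speaker then d.insert speaker (d.getD speaker "" ++ " " ++ text)
      else d.insert speaker text
  | _ => d   -- Python raises ValueError here; excluded by Pre_

def extract_speaker_texts_alt (conversation : List String) : List (String × String) :=
  (conversation.foldl pvStepB PySem.Dict.empty).items

-- ===== PRECONDITION & SPEC =====
-- Pre_ excludes exactly the entries without the ': ' separator, on which Python's
-- 'speaker, text = entry.split(': ', 1)' raises ValueError.
def Pre_extract_speaker_texts (conversation : List String) : Prop :=
  ∀ entry ∈ conversation, PySem.Str.isIn ": " entry = true
instance (conversation : List String) : Decidable (Pre_extract_speaker_texts conversation) := by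
  unfold Pre_extract_speaker_texts; infer_instance

def pvWitness_extract_speaker_texts : List String :=
  ["Alice: hi there", "Bob: ok", "Alice: bye"]

def Spec_extract_speaker_texts (conversation : List String) (out : List (String × String)) : Prop := out = extract_speaker_texts_alt conversation
instance (conversation : List String) (out : List (String × String)) : Decidable (Spec_extract_speaker_texts conversation out) := by unfold Spec_extract_speaker_texts; infer_instance

-- ===== CLAIM (what is proved, stated in full; the proofs are below) =====
def Claim_equal_extract_speaker_texts : Prop := ∀ (conversation : List String), Dom_extract_speaker_texts conversation → Pre_extract_speaker_texts conversation → Spec_extract_speaker_texts conversation (extract_speaker_texts conversation)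

-- ===== LEMMAS AND PROOFS =====

-- joining one more text onto a nonempty list of texts is appending the separator and the text
lemma pv_join_append (sp t : List Char) (ts : List (List Char)) (h : ts ≠ []) :
    PySem.Chars.join sp (ts ++ [t]) = PySem.Chars.join sp ts ++ sp ++ t := by
  induction ts with
  | nil => exact absurd rfl h
  | cons c rest ih =>
    cases rest with
    | nil => simp [PySem.Chars.join_cons_cons, PySem.Chars.join_singleton]
    | cons c' rest' =>
      simp only [List.cons_append]
      rw [PySem.Chars.join_cons_cons]
      have hih := ih (by simp)
      simp only [List.cons_append] at hih
      rw [hih, PySem.Chars.join_cons_cons]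
      simp [List.append_assoc]

lemma pv_str_join_append (t : String) (ts : List String) (h : ts ≠ []) :
    PySem.Str.join " " (ts ++ [t]) = PySem.Str.join " " ts ++ " " ++ t := by
  apply String.toList_injective
  have hts : ts.map String.toList ≠ [] := by simpa using h
  have hj := pv_join_append " ".toList t.toList (ts.map String.toList) hts
  simp only [PySem.Str.toList_join, String.toList_append, List.map_append, List.map_cons,
    List.map_nil] at hj ⊢
  rw [hj]

lemma pv_str_join_singleton (t : String) : PySem.Str.join " " [t] = t := by
  apply String.toList_injective
  simp [PySem.Str.toList_join, PySem.Chars.join_singleton]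

-- the loop invariant tying A's dict of text lists to B's dict of joined strings
def pvInv (dA : PySem.Dict String (List String)) (dB : PySem.Dict String String) : Prop :=
  dA.keys.Nodup ∧ dB.keys = dA.keys ∧
  ∀ k ∈ dA.keys, dA.getD k [] ≠ [] ∧ dB.getD k "" = PySem.Str.join " " (dA.getD k [])

lemma pvInv_step (dA : PySem.Dict String (List String)) (dB : PySem.Dict String String)
    (h : pvInv dA dB) (e : String) : pvInv (pvStepA dA e) (pvStepB dB e) := by
  obtain ⟨hnd, hkeys, hval⟩ := h
  unfold pvStepA pvStepB
  cases hsp : PySem.Str.splitMax? e ": " 1 with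
  | none => exact ⟨hnd, hkeys, hval⟩
  | some parts =>
    match parts with
    | [] => exact ⟨hnd, hkeys, hval⟩
    | [_] => exact ⟨hnd, hkeys, hval⟩
    | _ :: _ :: _ :: _ => exact ⟨hnd, hkeys, hval⟩
    | [s, t] =>
      have hcB : dB.contains s = dA.contains s := by
        rw [PySem.Dict.contains_eq_decide_mem_keys, PySem.Dict.contains_eq_decide_mem_keys, hkeys]
      by_cases hc : dA.contains s = true
      · have hcB' : dB.contains s = true := hcB.trans hc
        simp only [hc, hcB', if_true]
        refine ⟨?_, ?_, ?_⟩
        · rw [PySem.Dict.keys_modify, PySem.Dict.keys_insert_of_contains dA _ hc]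
          exact hnd
        · rw [PySem.Dict.keys_insert_of_contains dB _ hcB', PySem.Dict.keys_modify,
            PySem.Dict.keys_insert_of_contains dA _ hc]
          exact hkeys
        · intro k hk
          rw [PySem.Dict.keys_modify, PySem.Dict.keys_insert_of_contains dA _ hc] at hk
          by_cases hks : k = s
          · subst hks
            rw [PySem.Dict.getD_modify_self, PySem.Dict.getD_insert_self]
            refine ⟨by simp, ?_⟩
            rw [pv_str_join_append t _ (hval k hk).1, (hval k hk).2]
          · rw [PySem.Dict.getD_modify_of_ne dA _ _ hks,
              PySem.Dict.getD_insert_of_ne dB _ _ hks]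
            exact hval k hk
      · have hc' : dA.contains s = false := by simpa using hc
        have hcB' : dB.contains s = false := hcB.trans hc'
        have hsmem : s ∉ dA.keys := by
          intro hm; exact hc ((PySem.Dict.contains_iff_mem_keys dA s).mpr hm)
        simp only [hc', hcB', Bool.false_eq_true, if_false]
        have hkeysA : (dA.insert s []).keys = dA.keys ++ [s] :=
          PySem.Dict.keys_insert_of_not_contains dA [] hc'
        have hcA1 : (dA.insert s []).contains s = true := PySem.Dict.contains_insert_self dA s []
        refine ⟨?_, ?_, ?_⟩
        · rw [PySem.Dict.keys_modify, PySem.Dict.keys_insert_of_contains _ _ hcA1, hkeysA]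
          rw [List.nodup_append]
          refine ⟨hnd, List.nodup_singleton s, ?_⟩
          intro a ha b hb
          rw [List.mem_singleton] at hb
          exact fun heq => hsmem ((heq.trans hb) ▸ ha)
        · rw [PySem.Dict.keys_insert_of_not_contains dB t hcB', PySem.Dict.keys_modify,
            PySem.Dict.keys_insert_of_contains _ _ hcA1, hkeysA, hkeys]
        · intro k hk
          rw [PySem.Dict.keys_modify, PySem.Dict.keys_insert_of_contains _ _ hcA1,
            hkeysA] at hk
          by_cases hks : k = s
          · subst hks
            rw [PySem.Dict.getD_modify_self, PySem.Dict.getD_insert_self,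
              PySem.Dict.getD_insert_self]
            exact ⟨by simp, by simp [pv_str_join_singleton]⟩
          · have hk' : k ∈ dA.keys := by
              rcases List.mem_append.mp hk with h1 | h2
              · exact h1
              · exact absurd (by simpa using h2) hks
            rw [PySem.Dict.getD_modify_of_ne _ _ _ hks,
              PySem.Dict.getD_insert_of_ne _ _ _ hks,
              PySem.Dict.getD_insert_of_ne _ _ _ hks]
            exact hval k hk'

lemma pvInv_foldl (conversation : List String) (dA : PySem.Dict String (List String))
    (dB : PySem.Dict String String) (h : pvInv dA dB) :
    pvInv (conversation.foldl pvStepA dA) (conversation.foldl pvStepB dB) := by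
  induction conversation generalizing dA dB with
  | nil => exact h
  | cons e rest ih => exact ih _ _ (pvInv_step dA dB h e)

lemma pvInv_items (dA : PySem.Dict String (List String)) (dB : PySem.Dict String String)
    (h : pvInv dA dB) :
    dA.items.map (fun p => (p.1, PySem.Str.join " " p.2)) = dB.items := by
  obtain ⟨hnd, hkeys, hval⟩ := h
  rw [PySem.Dict.items_eq_map_keys dA hnd [], PySem.Dict.items_eq_map_keys dB (hkeys ▸ hnd) "",
    hkeys, List.map_map]
  apply List.map_congr_left
  intro k hk
  simp [(hval k hk).2]

-- ===== VERDICT (by name: the statement is the Claim_ definition above) =====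
theorem extract_speaker_texts_spec : Claim_equal_extract_speaker_texts := by
  intro conversation _ _
  unfold Spec_extract_speaker_texts extract_speaker_texts extract_speaker_texts_alt
  exact pvInv_items _ _ (pvInv_foldl conversation _ _
    ⟨by simp [PySem.Dict.keys_empty], by simp [PySem.Dict.keys_empty],
      by simp [PySem.Dict.keys_empty]⟩)
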